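-- pv_equiv track=rewrite | github.com/nqdat2002/Training-Algorithms | LuyenTapLapTrinh/Dem uoc so cua boi so chung nho nhat.py | count
-- ===== SOURCE A (Python) =====
-- p = [True] * 100001
--
-- mod = 10**9 + 7
--
-- def count(n):
--     cnt = 1
--     for i in range(2, n+1):
--         if p[i]:
--             exp = 1
--             while n // (i**exp) > 0:
--                 exp += 1
--             cnt = (cnt * exp) % mod
--     return cnt
-- ===== SOURCE B (Python) =====
-- def count(n):
--     mod = 10**9 + 7
--     if n < 2:
--         return 1
--     # s = floor(sqrt(n)); every i in (s, n] contributes exponent 2, so one modular power covers them all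
--     s = 1
--     while (s + 1) * (s + 1) <= n:
--         s += 1
--     cnt = 1
--     for i in range(2, s + 1):
--         e = 1
--         pw = i
--         while pw * i <= n:
--             pw *= i
--             e += 1
--         cnt = cnt * (e + 1) % mod
--     return cnt * pow(2, n - s, mod) % mod
-- ===== Notes on version B (the rewrite author's own statement) =====
-- stated objective: faster
-- what changed: Instead of scanning every candidate base up to n with a trial-exponent loop per base (over an all-True sieve), B splits at the integer square root: it computes exponents directly only for the small bases and covers all larger bases, whose exponent is always two, with a single modular power.
-- crash fix: On every n > 100000 A raises IndexError (it indexes the fixed table p, which has only 100001 entries), while B returns the divisor-count product there. — e.g. on count(100001): A raises IndexError, B returns 355116502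
import Mathlib
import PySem

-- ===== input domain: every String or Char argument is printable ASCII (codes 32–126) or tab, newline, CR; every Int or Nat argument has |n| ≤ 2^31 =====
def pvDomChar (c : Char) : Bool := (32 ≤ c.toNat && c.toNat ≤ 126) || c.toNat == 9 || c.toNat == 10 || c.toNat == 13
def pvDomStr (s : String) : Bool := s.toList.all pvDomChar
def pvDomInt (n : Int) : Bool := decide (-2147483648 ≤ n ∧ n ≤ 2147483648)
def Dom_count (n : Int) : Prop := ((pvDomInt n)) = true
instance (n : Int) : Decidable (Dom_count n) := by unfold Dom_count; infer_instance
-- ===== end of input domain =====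

-- B replaces A's per-i loop over 2..n by a √n-split: i ≤ √n computed directly, the rest covered
-- by one modular power 2^(n-√n) — asymptotically faster.

-- ===== PORT A =====
-- module-level `p = [True] * 100001` (the sieve is never run, so every entry stays True)
def pList : List Bool := List.replicate 100001 true

-- `while n // (i**exp) > 0: exp += 1` — fuel-guarded for totality only; 64 steps suffice for
-- every i ≥ 2 (as produced by the loop) and |n| ≤ 2^31
def expLoopA : Nat → Int → Int → Int → Int
  | 0, _, _, exp => exp
  | f+1, n, i, exp =>
      if 0 < PySem.Int.floordiv n (i ^ exp.toNat) then expLoopA f n i (exp + 1) else exp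

def count (n : Int) : Int :=
  (PySem.List.pyRange 2 (n+1) 1).foldl
    (fun cnt i =>
      if (PySem.List.pyGet? pList i).getD false then
        PySem.Int.mod (cnt * expLoopA 64 n i 1) (10^9+7)
      else cnt) 1

-- ===== PORT B =====
-- `while (s+1)*(s+1) <= n: s += 1` — fuel n.toNat+1 is enough since s advances at most to √n
def isqrtLoop : Nat → Int → Int → Int
  | 0, _, s => s
  | f+1, n, s => if (s+1) * (s+1) ≤ n then isqrtLoop f n (s+1) else s

-- `while pw * i <= n: pw *= i; e += 1` — fuel-guarded; 64 steps suffice for i ≥ 2 and |n| ≤ 2^31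
def powLoopB : Nat → Int → Int → Int → Int → Int
  | 0, _, _, _, e => e
  | f+1, n, i, pw, e => if pw * i ≤ n then powLoopB f n i (pw * i) (e + 1) else e

def count_alt (n : Int) : Int :=
  if n < 2 then 1
  else
    let s := isqrtLoop (n.toNat + 1) n 1
    let cnt := (PySem.List.pyRange 2 (s+1) 1).foldl
      (fun cnt i => PySem.Int.mod (cnt * (powLoopB 64 n i i 1 + 1)) (10^9+7)) 1
    PySem.Int.mod (cnt * PySem.Int.powMod 2 (n - s).toNat (10^9+7)) (10^9+7)

-- ===== PRECONDITION & SPEC =====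
-- Pre_ excludes n ≥ 100001, where A raises IndexError (p has only 100001 entries); A returns on all other inputs.
def Pre_count (n : Int) : Prop := n ≤ 100000
instance (n : Int) : Decidable (Pre_count n) := by unfold Pre_count; infer_instance
def pvWitness_count : Int := 10

-- On every n > 100000 A raises IndexError (index into the fixed 100001-entry table p), while B returns the product.
def Raises_count (n : Int) : Prop := 100000 < n
instance (n : Int) : Decidable (Raises_count n) := by unfold Raises_count; infer_instance
def pvRaiseWitness_count : Int := 100001
def pvRaiseWitnessOut_count : Int := 355116502

def Spec_count (n : Int) (out : Int) : Prop := out = count_alt n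
instance (n : Int) (out : Int) : Decidable (Spec_count n out) := by unfold Spec_count; infer_instance

-- ===== CLAIM (what is proved, stated in full; the proofs are below) =====
def Claim_equal_count : Prop := ∀ (n : Int), Dom_count n → Pre_count n → Spec_count n (count n)
def Claim_raises_count : Prop := (∀ (n : Int), Dom_count n → Raises_count n → ¬ Pre_count n) ∧ (Dom_count (pvRaiseWitness_count) ∧ Raises_count (pvRaiseWitness_count) ∧ count_alt (pvRaiseWitness_count) = pvRaiseWitnessOut_count)

-- ===== LEMMAS AND PROOFS =====

-- p[i] is True for every in-range index
theorem pList_get (i : Int) (h0 : 0 ≤ i) (h1 : i ≤ 100000) :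
    (PySem.List.pyGet? pList i).getD false = true := by
  rw [PySem.List.pyGet?_of_nonneg pList h0,
    show pList = List.replicate 100001 true from rfl, List.getElem?_replicate,
    if_pos (by omega : i.toNat < 100001)]
  rfl

-- `n // p > 0` is exactly `p ≤ n` (for 0 < p, 0 ≤ n)
theorem fd_pos_iff (n p : Int) (hp : 0 < p) (hn : 0 ≤ n) :
    (0 < PySem.Int.floordiv n p) ↔ p ≤ n := by
  have h := PySem.Int.le_floordiv_iff_mul_le (a := n) (q := 1) hp
  omega

-- A's while loop exits as soon as i^e exceeds n
theorem expLoopA_stop (f : Nat) (n i e : Int) (hp : 0 < i ^ e.toNat) (hn : 0 ≤ n)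
    (h : ¬ i ^ e.toNat ≤ n) : expLoopA f n i e = e := by
  cases f with
  | zero => rfl
  | succ g =>
      simp only [expLoopA]
      rw [if_neg (by rw [fd_pos_iff n _ hp hn]; exact h)]

-- A's exponent loop = B's power loop + 1 (invariant: pw = i ^ e)
theorem exp_eq_pow (f : Nat) : ∀ (n i e : Int), 2 ≤ i → 1 ≤ e → 0 ≤ n → i ^ e.toNat ≤ n →
    expLoopA (f+1) n i e = powLoopB f n i (i ^ e.toNat) e + 1 := by
  induction f with
  | zero =>
      intro n i e hi he hn hpow
      have hp : (0:Int) < i ^ e.toNat := by positivity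
      simp only [expLoopA, powLoopB]
      rw [if_pos ((fd_pos_iff n _ hp hn).mpr hpow)]
  | succ g ih =>
      intro n i e hi he hn hpow
      have hp : (0:Int) < i ^ e.toNat := by positivity
      have hps : i ^ (e+1).toNat = i ^ e.toNat * i := by
        rw [show (e+1).toNat = e.toNat + 1 by omega, pow_succ]
      conv_lhs => rw [expLoopA]
      rw [if_pos ((fd_pos_iff n _ hp hn).mpr hpow)]
      conv_rhs => rw [powLoopB]
      by_cases h2 : i ^ e.toNat * i ≤ n
      · rw [if_pos h2, ← hps, ih n i (e+1) hi (by omega) hn (by rw [hps]; exact h2)]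
      · rw [if_neg h2]
        exact expLoopA_stop (g+1) n i (e+1) (by positivity) hn (by rw [hps]; exact h2)

-- once the remaining fuel bounds the loop, one more unit of fuel changes nothing
theorem powLoopB_fuel (f : Nat) : ∀ (n i pw e : Int), 2 ≤ i → 1 ≤ pw → n < pw * i ^ f →
    powLoopB (f+1) n i pw e = powLoopB f n i pw e := by
  induction f with
  | zero =>
      intro n i pw e hi hpw hlt
      have : ¬ pw * i ≤ n := by nlinarith
      simp [powLoopB, this]
  | succ g ih =>
      intro n i pw e hi hpw hlt
      by_cases h : pw * i ≤ n
      · simp only [powLoopB, h, if_true]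
        exact ih n i (pw * i) (e+1) hi (by nlinarith)
          (by rw [pow_succ] at hlt; nlinarith [pow_pos (by omega : (0:Int) < i) g])
      · simp [powLoopB, h]

theorem powLoopB_64_63 (n i : Int) (hi : 2 ≤ i) (hn : n ≤ 2147483648) :
    powLoopB 64 n i i 1 = powLoopB 63 n i i 1 := by
  apply powLoopB_fuel 63 n i i 1 hi (by omega)
  have h63 : (2:Int) ^ 63 ≤ i ^ 63 := by
    apply pow_le_pow_left₀ (by omega) hi
  nlinarith

-- the top-level correspondence between the two inner loops
theorem exp_eq_pow_top (n i : Int) (hi : 2 ≤ i) (hin : i ≤ n) (hn : n ≤ 2147483648) :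
    expLoopA 64 n i 1 = powLoopB 64 n i i 1 + 1 := by
  have h1 : i ^ (1:Int).toNat = i := by norm_num
  have h := exp_eq_pow 63 n i 1 hi le_rfl (by omega) (by rw [h1]; exact hin)
  rw [powLoopB_64_63 n i hi hn, h, h1]

-- for i above the integer square root the loop exits immediately: factor 2
theorem powLoopB_big (n i : Int) (hbig : n < i * i) : powLoopB 64 n i i 1 = 1 := by
  have : ¬ i * i ≤ n := by omega
  simp [powLoopB, this]

-- the isqrt loop's result r satisfies r² ≤ n < (r+1)² and 1 ≤ r
theorem isqrtLoop_spec (f : Nat) : ∀ (n s : Int), 1 ≤ s → s * s ≤ n → n < (s + f + 1) * (s + f + 1) →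
    (isqrtLoop f n s) * (isqrtLoop f n s) ≤ n ∧ n < (isqrtLoop f n s + 1) * (isqrtLoop f n s + 1) ∧
    1 ≤ isqrtLoop f n s := by
  induction f with
  | zero =>
      intro n s hs hle hlt
      simp only [isqrtLoop]
      refine ⟨hle, by push_cast at hlt ⊢; nlinarith, hs⟩
  | succ g ih =>
      intro n s hs hle hlt
      by_cases h : (s+1) * (s+1) ≤ n
      · simp only [isqrtLoop, h, if_true]
        exact ih n (s+1) (by omega) h (by push_cast at hlt ⊢; nlinarith)
      · simp only [isqrtLoop, h, if_false]
        exact ⟨hle, by omega, hs⟩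

theorem isqrt_spec (n : Int) (hn : 2 ≤ n) :
    (isqrtLoop (n.toNat + 1) n 1) * (isqrtLoop (n.toNat + 1) n 1) ≤ n ∧
    n < (isqrtLoop (n.toNat + 1) n 1 + 1) * (isqrtLoop (n.toNat + 1) n 1 + 1) ∧
    1 ≤ isqrtLoop (n.toNat + 1) n 1 := by
  apply isqrtLoop_spec
  · omega
  · omega
  · have h : ((n.toNat : Int)) = n := by omega
    push_cast
    nlinarith

-- bounds of the running product (each step ends with % (10^9+7))
theorem fold_bound (L : List Int) : ∀ (c : Int) (g : Int → Int), 0 ≤ c → c < 10^9+7 →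
    0 ≤ L.foldl (fun cnt i => PySem.Int.mod (cnt * g i) (10^9+7)) c ∧
    L.foldl (fun cnt i => PySem.Int.mod (cnt * g i) (10^9+7)) c < 10^9+7 := by
  induction L with
  | nil =>
      intro c g h0 h1
      simp only [List.foldl_nil]
      exact ⟨h0, h1⟩
  | cons x t ih =>
      intro c g h0 h1
      simp only [List.foldl_cons]
      exact ih _ g (PySem.Int.mod_nonneg _ (by norm_num)) (PySem.Int.mod_lt _ (by norm_num))

-- absorbing an inner % into a product modulo the same modulus
theorem mul_emod_absorb (a b : Int) :
    (a * (b % (10^9+7))) % (10^9+7) = (a * b) % (10^9+7) := by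
  conv_lhs => rw [Int.mul_emod]
  rw [Int.emod_emod_of_dvd _ dvd_rfl, ← Int.mul_emod]

-- a fold that multiplies by 2 (mod M) each step is multiplication by 2^length (mod M)
theorem fold_two (L : List Int) : ∀ (c : Int), 0 ≤ c → c < 10^9+7 →
    L.foldl (fun cnt _ => PySem.Int.mod (cnt * 2) (10^9+7)) c = (c * 2 ^ L.length) % (10^9+7) := by
  induction L with
  | nil =>
      intro c h0 h1
      simp only [List.foldl_nil, List.length_nil, pow_zero, mul_one]
      exact (Int.emod_eq_of_lt h0 h1).symm
  | cons x t ih =>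
      intro c h0 h1
      simp only [List.foldl_cons, List.length_cons]
      rw [ih _ (PySem.Int.mod_nonneg _ (by norm_num)) (PySem.Int.mod_lt _ (by norm_num)),
        PySem.Int.mod_eq_emod_of_pos (by norm_num)]
      calc c * 2 % (10^9+7) * 2 ^ t.length % (10^9+7)
          = (c * 2 % (10^9+7)) * 2 ^ t.length % (10^9+7) := by ring_nf
        _ = 2 ^ t.length * (c * 2 % (10^9+7)) % (10^9+7) := by ring_nf
        _ = 2 ^ t.length * (c * 2) % (10^9+7) := mul_emod_absorb _ _
        _ = c * 2 ^ (t.length + 1) % (10^9+7) := by ring_nf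

-- fuel beyond the exit point of the isqrt loop is irrelevant
theorem isqrt_fuel_add (f : Nat) : ∀ (g : Nat) (n s : Int), n < (s + f + 1) * (s + f + 1) →
    isqrtLoop (f + g) n s = isqrtLoop f n s := by
  induction f with
  | zero =>
      intro g n s hlt
      cases g with
      | zero => rfl
      | succ g' =>
          simp only [isqrtLoop]
          rw [if_neg (by push_cast at hlt; nlinarith)]
  | succ f ih =>
      intro g n s hlt
      rw [show f + 1 + g = (f + g) + 1 from by omega]
      simp only [isqrtLoop]
      by_cases h : (s+1) * (s+1) ≤ n
      · rw [if_pos h, if_pos h]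
        exact ih g n (s+1) (by push_cast at hlt ⊢; nlinarith)
      · rw [if_neg h, if_neg h]

-- square-and-multiply steps, used to evaluate 2^99685 % (10^9+7) at the raise witness
theorem pow2_dbl (a : Nat) (r : Int) (h : (2:Int)^a % (10^9+7) = r) :
    (2:Int)^(2*a) % (10^9+7) = r * r % (10^9+7) := by
  rw [two_mul, pow_add, Int.mul_emod, h]

theorem pow2_dbl1 (a : Nat) (r : Int) (h : (2:Int)^a % (10^9+7) = r) :
    (2:Int)^(2*a+1) % (10^9+7) = r * r * 2 % (10^9+7) := by
  rw [pow_succ, Int.mul_emod, two_mul, pow_add, Int.mul_emod (2^a) (2^a), h,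
    Int.mul_emod (r*r) 2]

-- B's value at the raise witness, evaluated in pieces (the fold is split to keep reduction shallow)
set_option maxRecDepth 8192 in
theorem count_alt_at_raise_witness : count_alt 100001 = 355116502 := by
  have h1 : (2:Int)^1 % (10^9+7) = 2 := by decide
  have h2 : (2:Int)^3 % (10^9+7) = 8 := by rw [show (3:Nat) = 2*1+1 from rfl]; rw [pow2_dbl1 1 2 h1]; decide
  have h3 : (2:Int)^6 % (10^9+7) = 64 := by rw [show (6:Nat) = 2*3 from rfl]; rw [pow2_dbl 3 8 h2]; decide
  have h4 : (2:Int)^12 % (10^9+7) = 4096 := by rw [show (12:Nat) = 2*6 from rfl]; rw [pow2_dbl 6 64 h3]; decide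
  have h5 : (2:Int)^24 % (10^9+7) = 16777216 := by rw [show (24:Nat) = 2*12 from rfl]; rw [pow2_dbl 12 4096 h4]; decide
  have h6 : (2:Int)^48 % (10^9+7) = 974740338 := by rw [show (48:Nat) = 2*24 from rfl]; rw [pow2_dbl 24 16777216 h5]; decide
  have h7 : (2:Int)^97 % (10^9+7) = 747046415 := by rw [show (97:Nat) = 2*48+1 from rfl]; rw [pow2_dbl1 48 974740338 h6]; decide
  have h8 : (2:Int)^194 % (10^9+7) = 257803831 := by rw [show (194:Nat) = 2*97 from rfl]; rw [pow2_dbl 97 747046415 h7]; decide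
  have h9 : (2:Int)^389 % (10^9+7) = 626073719 := by rw [show (389:Nat) = 2*194+1 from rfl]; rw [pow2_dbl1 194 257803831 h8]; decide
  have h10 : (2:Int)^778 % (10^9+7) = 878712875 := by rw [show (778:Nat) = 2*389 from rfl]; rw [pow2_dbl 389 626073719 h9]; decide
  have h11 : (2:Int)^1557 % (10^9+7) = 571622896 := by rw [show (1557:Nat) = 2*778+1 from rfl]; rw [pow2_dbl1 778 878712875 h10]; decide
  have h12 : (2:Int)^3115 % (10^9+7) = 888315377 := by rw [show (3115:Nat) = 2*1557+1 from rfl]; rw [pow2_dbl1 1557 571622896 h11]; decide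
  have h13 : (2:Int)^6230 % (10^9+7) = 490922708 := by rw [show (6230:Nat) = 2*3115 from rfl]; rw [pow2_dbl 3115 888315377 h12]; decide
  have h14 : (2:Int)^12460 % (10^9+7) = 543017543 := by rw [show (12460:Nat) = 2*6230 from rfl]; rw [pow2_dbl 6230 490922708 h13]; decide
  have h15 : (2:Int)^24921 % (10^9+7) = 883361005 := by rw [show (24921:Nat) = 2*12460+1 from rfl]; rw [pow2_dbl1 12460 543017543 h14]; decide
  have h16 : (2:Int)^49842 % (10^9+7) = 692323412 := by rw [show (49842:Nat) = 2*24921 from rfl]; rw [pow2_dbl 24921 883361005 h15]; decide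
  have h17 : (2:Int)^99685 % (10^9+7) = 896279646 := by rw [show (99685:Nat) = 2*49842+1 from rfl]; rw [pow2_dbl1 49842 692323412 h16]; decide
  have hs : isqrtLoop ((100001:Int).toNat + 1) (100001:Int) 1 = 316 := by
    rw [show (100001:Int).toNat + 1 = 350 + 99652 from by decide]
    rw [isqrt_fuel_add 350 99652 100001 1 (by norm_num)]
    decide
  unfold count_alt
  rw [if_neg (by norm_num)]
  simp only [hs]
  rw [show ((316:Int) + 1) = 317 from by norm_num,
    show ((100001:Int) - 316).toNat = 99685 from by decide,
    PySem.Int.powMod_eq_emod 2 99685 (by norm_num), h17,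
    PySem.List.pyRange_one_append 2 100 317 (by norm_num) (by norm_num),
    PySem.List.pyRange_one_append 100 200 317 (by norm_num) (by norm_num),
    ← List.append_assoc, List.foldl_append, List.foldl_append,
    show (PySem.List.pyRange 2 100).foldl (fun cnt i =>
      PySem.Int.mod (cnt * (powLoopB 64 100001 i i 1 + 1)) (10^9+7)) 1 = 333578460 from by decide,
    show (PySem.List.pyRange 100 200).foldl (fun cnt i =>
      PySem.Int.mod (cnt * (powLoopB 64 100001 i i 1 + 1)) (10^9+7)) 333578460 = 382194071 from by decide,
    show (PySem.List.pyRange 200 317).foldl (fun cnt i =>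
      PySem.Int.mod (cnt * (powLoopB 64 100001 i i 1 + 1)) (10^9+7)) 382194071 = 943813552 from by decide]
  decide

-- ===== VERDICT (by name: the statement is the Claim_ definition above) =====
theorem count_spec : Claim_equal_count := by
  intro n hdom hpre
  unfold Spec_count count count_alt
  unfold Pre_count at hpre
  have hdom' : -2147483648 ≤ n ∧ n ≤ 2147483648 := by
    simpa [Dom_count, pvDomInt] using hdom
  by_cases hn2 : n < 2
  · rw [PySem.List.pyRange_one_eq_nil (by omega : n + 1 ≤ 2)]
    simp [hn2]
  · push_neg at hn2
    simp only [if_neg (by omega : ¬ n < 2)]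
    set s := isqrtLoop (n.toNat + 1) n 1 with hs
    obtain ⟨hsle, hslt, hs1⟩ := isqrt_spec n hn2
    rw [← hs] at hsle hslt hs1
    have hsn : s ≤ n := by nlinarith
    -- split A's range at s+1
    rw [PySem.List.pyRange_one_append 2 (s+1) (n+1) (by omega) (by omega), List.foldl_append]
    -- first part: identical to B's fold
    have hfirst :
        (PySem.List.pyRange 2 (s+1)).foldl
          (fun cnt i => if (PySem.List.pyGet? pList i).getD false then
              PySem.Int.mod (cnt * expLoopA 64 n i 1) (10^9+7) else cnt) 1
        = (PySem.List.pyRange 2 (s+1)).foldl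
          (fun cnt i => PySem.Int.mod (cnt * (powLoopB 64 n i i 1 + 1)) (10^9+7)) 1 := by
      apply PySem.List.foldl_congr_mem
      intro acc x hx
      rw [PySem.List.mem_pyRange_one] at hx
      rw [pList_get x (by omega) (by omega), if_pos rfl,
        exp_eq_pow_top n x hx.1 (by omega) hdom'.2]
    rw [hfirst]
    set c := (PySem.List.pyRange 2 (s+1)).foldl
      (fun cnt i => PySem.Int.mod (cnt * (powLoopB 64 n i i 1 + 1)) (10^9+7)) 1 with hc
    obtain ⟨hc0, hc1⟩ := fold_bound (PySem.List.pyRange 2 (s+1)) 1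
      (fun i => powLoopB 64 n i i 1 + 1) (by norm_num) (by norm_num)
    rw [← hc] at hc0 hc1
    -- second part: every factor is 2
    have hsecond :
        (PySem.List.pyRange (s+1) (n+1)).foldl
          (fun cnt i => if (PySem.List.pyGet? pList i).getD false then
              PySem.Int.mod (cnt * expLoopA 64 n i 1) (10^9+7) else cnt) c
        = (PySem.List.pyRange (s+1) (n+1)).foldl
          (fun cnt _ => PySem.Int.mod (cnt * 2) (10^9+7)) c := by
      apply PySem.List.foldl_congr_mem
      intro acc x hx
      rw [PySem.List.mem_pyRange_one] at hx
      have hx2 : 2 ≤ x := by omega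
      rw [pList_get x (by omega) (by omega), if_pos rfl,
        exp_eq_pow_top n x hx2 (by omega) hdom'.2,
        powLoopB_big n x (by nlinarith)]
      norm_num
    rw [hsecond, fold_two _ c hc0 hc1, PySem.List.length_pyRange_one,
      show (n + 1 - (s + 1)).toNat = (n - s).toNat by omega,
      PySem.Int.powMod_eq_emod 2 (n - s).toNat (by norm_num),
      PySem.Int.mod_eq_emod_of_pos (by norm_num), mul_emod_absorb]

@[simp] theorem count_raises : Claim_raises_count := by
  unfold Claim_raises_count
  refine ⟨?_, by decide, by decide, count_alt_at_raise_witness⟩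
  intro n _ hr hp
  unfold Raises_count at hr
  unfold Pre_count at hp
  omega
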